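-- pv_equiv track=rewrite | github.com/reduce-algebra/reduce-algebra | generic/redlogtest/rlanalyze.py | column_list
-- ===== SOURCE A (Python) =====
-- def column_list(select_arg: str) -> list:
--     if select_arg == None or select_arg == "cpu":
--         return ["name", "cpu_ref_csl", "cpu_now_csl", "cpu_delta_csl",\
--                 "cpu_ratio_csl", "cpu_ref_psl", "cpu_now_psl", "cpu_delta_psl", "cpu_ratio_psl",\
--                 "cpu_ref_mean", "cpu_now_mean", "cpu_delta_mean", "cpu_ratio_mean"]
--     elif select_arg == "gc":
--         return ["name", "gc_ref_csl", "gc_now_csl", "gc_delta_csl",\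
--                 "gc_ratio_csl", "gc_ref_psl", "gc_now_psl", "gc_delta_psl", "gc_ratio_psl",\
--                 "gc_ref_mean", "gc_now_mean", "gc_delta_mean", "gc_ratio_mean"]
--     elif select_arg == "all":
--         return [*column_list("cpu"), *column_list("gc")]
-- ===== SOURCE B (Python) =====
-- def column_list(select_arg: str) -> list:
--     def cols(prefix):
--         return ["name"] + ["%s_%s_%s" % (prefix, kind, stat)
--                            for stat in ("csl", "psl", "mean")
--                            for kind in ("ref", "now", "delta", "ratio")]
--     if select_arg is None or select_arg == "cpu":
--         return cols("cpu")
--     if select_arg == "gc":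
--         return cols("gc")
--     if select_arg == "all":
--         return cols("cpu") + cols("gc")
-- ===== Notes on version B (the rewrite author's own statement) =====
-- stated objective: simpler
-- what changed: Replaces the 26 hard-coded column literals with a template: a prefix derived from select_arg plus a nested comprehension over (stat, kind) pairs; the combined case concatenates the two generated lists.
import Mathlib
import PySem

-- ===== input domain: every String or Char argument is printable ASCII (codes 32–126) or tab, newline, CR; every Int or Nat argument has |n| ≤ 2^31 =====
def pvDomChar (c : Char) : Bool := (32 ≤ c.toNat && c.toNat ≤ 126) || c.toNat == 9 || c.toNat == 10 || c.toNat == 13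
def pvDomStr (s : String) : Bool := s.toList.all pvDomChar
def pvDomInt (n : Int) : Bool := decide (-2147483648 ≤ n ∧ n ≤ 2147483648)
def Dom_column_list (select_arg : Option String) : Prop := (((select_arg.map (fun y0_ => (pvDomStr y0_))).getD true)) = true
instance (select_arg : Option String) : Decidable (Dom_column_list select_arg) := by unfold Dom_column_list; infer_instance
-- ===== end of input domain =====

-- B replaces A's 26 hard-coded column literals with a pfx + nested-loop template (simpler).

-- ===== PORT A =====
def column_list (select_arg : Option String) : Option (List String) :=
  if select_arg = none ∨ select_arg = some "cpu" then
    some ["name", "cpu_ref_csl", "cpu_now_csl", "cpu_delta_csl",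
          "cpu_ratio_csl", "cpu_ref_psl", "cpu_now_psl", "cpu_delta_psl", "cpu_ratio_psl",
          "cpu_ref_mean", "cpu_now_mean", "cpu_delta_mean", "cpu_ratio_mean"]
  else if select_arg = some "gc" then
    some ["name", "gc_ref_csl", "gc_now_csl", "gc_delta_csl",
          "gc_ratio_csl", "gc_ref_psl", "gc_now_psl", "gc_delta_psl", "gc_ratio_psl",
          "gc_ref_mean", "gc_now_mean", "gc_delta_mean", "gc_ratio_mean"]
  else if select_arg = some "all" then
    some ((column_list (some "cpu")).getD [] ++ (column_list (some "gc")).getD [])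
  else none
termination_by (if select_arg = some "all" then 1 else 0 : Nat)
decreasing_by all_goals simp_all

-- ===== PORT B =====
def colsTemplate (pfx : String) : List String :=
  "name" :: (["csl", "psl", "mean"].flatMap (fun stat =>
    ["ref", "now", "delta", "ratio"].map (fun kind =>
      pfx ++ "_" ++ kind ++ "_" ++ stat)))

def column_list_alt (select_arg : Option String) : Option (List String) :=
  if select_arg = none ∨ select_arg = some "cpu" then some (colsTemplate "cpu")
  else if select_arg = some "gc" then some (colsTemplate "gc")
  else if select_arg = some "all" then some (colsTemplate "cpu" ++ colsTemplate "gc")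
  else none

-- ===== PRECONDITION & SPEC =====
def Spec_column_list (select_arg : Option String) (out : Option (List String)) : Prop := out = column_list_alt select_arg
instance (select_arg : Option String) (out : Option (List String)) : Decidable (Spec_column_list select_arg out) := by unfold Spec_column_list; infer_instance

-- ===== CLAIM (what is proved, stated in full; the proofs are below) =====
def Claim_equal_column_list : Prop := ∀ (select_arg : Option String), Dom_column_list select_arg → Spec_column_list select_arg (column_list select_arg)

-- ===== LEMMAS AND PROOFS =====

-- ===== VERDICT (by name: the statement is the Claim_ definition above) =====
theorem column_list_spec : Claim_equal_column_list := by
  intro s _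
  unfold Spec_column_list
  rw [column_list, column_list_alt]
  split_ifs with h1 h2 h3
  · decide
  · decide
  · rw [column_list]; norm_num; rw [column_list]; norm_num; decide
  · rfl
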